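-- pv_equiv track=rewrite | github.com/transformerzhou/RCRel | results/collections/reader-2transformer.py | piece2word
-- ===== SOURCE A (Python) =====
-- def piece2word(token):
--     s = ""
--     for i in token:
--         if not i.startswith("##"):
--             s += ' '
--             s += i
--         else:
--             s += i[2:]
--     return s.lstrip()
-- ===== SOURCE B (Python) =====
-- def piece2word(token):
--     # scan the token list group by group: each word is a non-'##' piece (or a
--     # leading '##' run) together with the '##' pieces that follow it
--     words = []
--     n = len(token)
--     i = 0
--     while i < n:
--         j = i + 1
--         while j < n and token[j].startswith("##"):
--             j += 1
--         head = token[i][2:] if token[i].startswith("##") else token[i]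
--         words.append(head + "".join(t[2:] for t in token[i + 1:j]))
--         i = j
--     return " ".join(words).lstrip()
-- ===== Notes on version B (the rewrite author's own statement) =====
-- stated objective: alternative
-- what changed: B scans the token list group by group with two index pointers (an inner while advancing over the following '##' pieces), builds each word once by joining the group's suffixes, and emits ' '.join(words).lstrip(), instead of A's token-at-a-time running string concatenation fixed up by lstrip.
import Mathlib
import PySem

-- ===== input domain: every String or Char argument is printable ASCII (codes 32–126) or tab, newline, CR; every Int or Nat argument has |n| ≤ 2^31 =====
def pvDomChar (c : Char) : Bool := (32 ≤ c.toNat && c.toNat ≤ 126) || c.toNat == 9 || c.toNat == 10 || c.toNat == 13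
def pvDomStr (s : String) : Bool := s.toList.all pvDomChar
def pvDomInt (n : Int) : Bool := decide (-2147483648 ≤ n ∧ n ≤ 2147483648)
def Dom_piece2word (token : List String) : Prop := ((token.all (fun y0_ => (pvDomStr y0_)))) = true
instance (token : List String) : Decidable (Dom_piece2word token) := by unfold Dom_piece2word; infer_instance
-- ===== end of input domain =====

-- B replaces A's token-at-a-time string accumulation by a recursive descent over
-- maximal word groups (first piece + its following '##' pieces); alternative
-- decomposition, same asymptotic cost.

-- ===== PORT A =====
-- s = ""; for i in token: if not i.startswith("##"): s += ' '; s += i  else: s += i[2:]; return s.lstrip()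
def piece2word (token : List String) : String :=
  String.mk (PySem.Chars.lstrip
    (token.foldl (fun s i =>
      if ¬ (PySem.Chars.startswith i.toList ['#', '#'] = true) then
        s ++ [' '] ++ i.toList
      else
        s ++ PySem.Chars.slice i.toList (some 2) none) []))

-- ===== PORT B =====
-- words = []; outer while scans group by group, the inner while advancing j over
-- '##' pieces (= takeWhile / dropWhile of the remaining list), one word appended
-- per group; return " ".join(words).lstrip()
def piece2word_words : List String → List (List Char)
  | [] => []
  | t :: rest =>
    ((if PySem.Chars.startswith t.toList ['#', '#'] = true then
        PySem.Chars.slice t.toList (some 2) none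
      else t.toList)
      ++ (rest.takeWhile (fun x => PySem.Chars.startswith x.toList ['#', '#'])).flatMap
           (fun x => PySem.Chars.slice x.toList (some 2) none))
    :: piece2word_words (rest.dropWhile (fun x => PySem.Chars.startswith x.toList ['#', '#']))
termination_by ts => ts.length
decreasing_by
  simp only [List.length_cons]
  exact Nat.lt_succ_of_le (List.length_dropWhile_le _ _)

def piece2word_alt (token : List String) : String :=
  String.mk (PySem.Chars.lstrip (PySem.Chars.join [' '] (piece2word_words token)))

-- ===== PRECONDITION & SPEC =====
def Spec_piece2word (token : List String) (out : String) : Prop := out = piece2word_alt token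
instance (token : List String) (out : String) : Decidable (Spec_piece2word token out) := by unfold Spec_piece2word; infer_instance

-- ===== CLAIM =====
def Claim_equal_piece2word : Prop := ∀ (token : List String), Dom_piece2word token → Spec_piece2word token (piece2word token)

-- ===== LEMMAS AND PROOFS =====

-- proof-side helper: the joined string computed group-recursively
def piece2word_join : List String → List Char
  | [] => []
  | t :: rest =>
    let word := (if PySem.Chars.startswith t.toList ['#', '#'] = true then
                   PySem.Chars.slice t.toList (some 2) none
                 else t.toList)
      ++ (rest.takeWhile (fun x => PySem.Chars.startswith x.toList ['#', '#'])).flatMap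
           (fun x => PySem.Chars.slice x.toList (some 2) none)
    if (rest.dropWhile (fun x => PySem.Chars.startswith x.toList ['#', '#'])).isEmpty then
      word
    else
      word ++ ' ' :: piece2word_join (rest.dropWhile (fun x => PySem.Chars.startswith x.toList ['#', '#']))
termination_by ts => ts.length
decreasing_by
  simp only [List.length_cons]
  exact Nat.lt_succ_of_le (List.length_dropWhile_le _ _)


-- one token's contribution to A's pre-lstrip string
def pvPiece (t : String) : List Char :=
  if PySem.Chars.startswith t.toList ['#', '#'] = true then
    PySem.Chars.slice t.toList (some 2) none
  else
    ' ' :: t.toList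

lemma pvA_foldl (token : List String) :
    ∀ acc : List Char,
      token.foldl (fun s i =>
        if ¬ (PySem.Chars.startswith i.toList ['#', '#'] = true) then
          s ++ [' '] ++ i.toList
        else
          s ++ PySem.Chars.slice i.toList (some 2) none) acc
      = acc ++ token.flatMap pvPiece := by
  induction token with
  | nil => intro acc; simp
  | cons t rest ih =>
    intro acc
    simp only [List.foldl_cons, List.flatMap_cons, ih]
    by_cases h : PySem.Chars.startswith t.toList ['#', '#'] = true <;>
      simp [pvPiece, h]

lemma pvFlatMap_all_cont (g : List String)
    (h : ∀ x ∈ g, PySem.Chars.startswith x.toList ['#', '#'] = true) :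
    g.flatMap pvPiece = g.flatMap (fun x => PySem.Chars.slice x.toList (some 2) none) := by
  induction g with
  | nil => rfl
  | cons a r ih =>
    simp only [List.flatMap_cons]
    rw [ih (fun x hx => h x (List.mem_cons_of_mem _ hx))]
    have ha := h a (List.mem_cons_self ..)
    simp [pvPiece, ha]

lemma pvDropWhile_head {α : Type} (p : α → Bool) :
    ∀ (l : List α) (u : α) (t' : List α), l.dropWhile p = u :: t' → p u = false := by
  intro l
  induction l with
  | nil => intro u t' h; simp [List.dropWhile] at h
  | cons a r ih =>
    intro u t' h
    by_cases ha : p a = true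
    · rw [List.dropWhile_cons_of_pos ha] at h; exact ih u t' h
    · rw [List.dropWhile_cons_of_neg ha] at h
      cases h; simpa using ha

-- A's flat contribution vs B's grouped join: equal up to one leading space.
lemma pvKey (n : Nat) : ∀ (t : String) (rest : List String), rest.length ≤ n →
    (t :: rest).flatMap pvPiece =
      (if PySem.Chars.startswith t.toList ['#', '#'] = true then
         piece2word_join (t :: rest)
       else ' ' :: piece2word_join (t :: rest)) := by
  induction n with
  | zero =>
    intro t rest hlen
    have : rest = [] := List.length_eq_zero_iff.mp (Nat.le_zero.mp hlen)
    subst this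
    by_cases h : PySem.Chars.startswith t.toList ['#', '#'] = true <;>
      simp [piece2word_join, pvPiece, h, List.dropWhile, List.takeWhile]
  | succ n ih =>
    intro t rest hlen
    set p : String → Bool := fun x => PySem.Chars.startswith x.toList ['#', '#'] with hp
    have hsplit : rest = rest.takeWhile p ++ rest.dropWhile p :=
      (List.takeWhile_append_dropWhile).symm
    have hg : ∀ x ∈ rest.takeWhile p, PySem.Chars.startswith x.toList ['#', '#'] = true := by
      intro x hx
      have := List.mem_takeWhile_imp hx
      simpa [hp] using this
    have hflat : (t :: rest).flatMap pvPiece =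
        pvPiece t
        ++ (rest.takeWhile p).flatMap (fun x => PySem.Chars.slice x.toList (some 2) none)
        ++ (rest.dropWhile p).flatMap pvPiece := by
      conv_lhs => rw [List.flatMap_cons, hsplit]
      rw [List.flatMap_append, pvFlatMap_all_cont _ hg, List.append_assoc]
    cases htail : rest.dropWhile p with
    | nil =>
      have hjoin : piece2word_join (t :: rest) =
          (if PySem.Chars.startswith t.toList ['#', '#'] = true then
             PySem.Chars.slice t.toList (some 2) none
           else t.toList)
          ++ (rest.takeWhile p).flatMap (fun x => PySem.Chars.slice x.toList (some 2) none) := by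
        rw [piece2word_join]
        simp only [← hp]
        rw [htail]
        simp
      rw [hflat, htail, hjoin]
      by_cases h : PySem.Chars.startswith t.toList ['#', '#'] = true <;> simp [pvPiece, h]
    | cons u t' =>
      have hu : p u = false := pvDropWhile_head p rest u t' htail
      have hlen' : (u :: t').length ≤ n + 1 := by
        calc (u :: t').length = (rest.dropWhile p).length := by rw [htail]
        _ ≤ rest.length := List.length_dropWhile_le _ _
        _ ≤ n + 1 := hlen
      have hlen'' : t'.length ≤ n := by simpa using hlen'
      have hu' : PySem.Chars.startswith u.toList ['#', '#'] = false := by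
        simpa [hp] using hu
      have htailEq : (u :: t').flatMap pvPiece = ' ' :: piece2word_join (u :: t') := by
        have := ih u t' hlen''
        simpa [hu'] using this
      have hjoin : piece2word_join (t :: rest) =
          ((if PySem.Chars.startswith t.toList ['#', '#'] = true then
              PySem.Chars.slice t.toList (some 2) none
            else t.toList)
           ++ (rest.takeWhile p).flatMap (fun x => PySem.Chars.slice x.toList (some 2) none))
          ++ ' ' :: piece2word_join (u :: t') := by
        rw [piece2word_join]
        simp only [← hp]
        rw [htail]
        simp
      rw [hflat, htail, htailEq, hjoin]
      by_cases h : PySem.Chars.startswith t.toList ['#', '#'] = true <;> simp [pvPiece, h]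

lemma pvLstrip_cons_space (x : List Char) :
    PySem.Chars.lstrip (' ' :: x) = PySem.Chars.lstrip x := by
  have hsp : PySem.Chars.isspace ' ' = true := by decide
  simp [PySem.Chars.lstrip, List.dropWhile, hsp]

lemma pvJoin_words (n : Nat) : ∀ ts : List String, ts.length ≤ n →
    PySem.Chars.join [' '] (piece2word_words ts) = piece2word_join ts := by
  induction n with
  | zero =>
    intro ts hlen
    have : ts = [] := List.length_eq_zero_iff.mp (Nat.le_zero.mp hlen)
    subst this
    simp [piece2word_words, piece2word_join, PySem.Chars.join_nil]
  | succ n ih =>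
    intro ts hlen
    cases ts with
    | nil => simp [piece2word_words, piece2word_join, PySem.Chars.join_nil]
    | cons t rest =>
      set p : String → Bool := fun x => PySem.Chars.startswith x.toList ['#', '#'] with hp
      rw [piece2word_words, piece2word_join]
      cases htail : rest.dropWhile p with
      | nil =>
        simp only [← hp]
        simp [piece2word_words, PySem.Chars.join_singleton]
      | cons u t' =>
        have hrest : rest.length ≤ n := by simpa using hlen
        have hlen' : (u :: t').length ≤ n := by
          calc (u :: t').length = (rest.dropWhile p).length := by rw [htail]
          _ ≤ rest.length := List.length_dropWhile_le _ _
          _ ≤ n := hrest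
        have hihtail := ih (u :: t') hlen'
        simp only [← hp]
        rw [show piece2word_words (u :: t') =
            ((if PySem.Chars.startswith u.toList ['#', '#'] = true then
                PySem.Chars.slice u.toList (some 2) none
              else u.toList)
              ++ (t'.takeWhile (fun x => PySem.Chars.startswith x.toList ['#', '#'])).flatMap
                   (fun x => PySem.Chars.slice x.toList (some 2) none))
            :: piece2word_words (t'.dropWhile (fun x => PySem.Chars.startswith x.toList ['#', '#']))
          from by rw [piece2word_words]]
        rw [PySem.Chars.join_cons_cons, ← piece2word_words, hihtail]
        simp

-- ===== VERDICT =====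
theorem piece2word_spec : Claim_equal_piece2word := by
  intro token _
  unfold Spec_piece2word piece2word piece2word_alt
  rw [pvA_foldl token [], pvJoin_words token.length token le_rfl]
  cases token with
  | nil => simp [piece2word_join]
  | cons t rest =>
    rw [List.nil_append, pvKey rest.length t rest le_rfl]
    by_cases h : PySem.Chars.startswith t.toList ['#', '#'] = true
    · rw [if_pos h]
    · rw [if_neg h, pvLstrip_cons_space]
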